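-- pv_equiv track=rewrite | github.com/Manan-J98/Algorithms | 2149-remove-colored-pieces-if-both-neighbors-are-the-same-color/remove-colored-pieces-if-both-neighbors-are-the-same-color.py | winnerOfGame
-- ===== SOURCE A (Python) =====
-- def winnerOfGame(colors: str) -> bool:
--     move = 0
--     stack = []
--     for c in colors:
--         if not stack or stack[-1] == c:
--             stack.append(c)
--         elif stack[-1] != c:
--             stack = []
--             stack.append(c)
--
--         if len(stack) >= 3 and stack[-1] == "A":
--             move += 1
--         elif len(stack) >= 3 and stack[-1] == "B":
--             move -= 1
--     return move > 0
-- ===== SOURCE B (Python) =====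
-- def winnerOfGame(colors: str) -> bool:
--     # Group-then-tally: scan maximal runs of equal colors with two pointers,
--     # each run of length L >= 3 contributes L-2 to its player's score.
--     score = 0
--     i = 0
--     n = len(colors)
--     while i < n:
--         j = i
--         while j < n and colors[j] == colors[i]:
--             j += 1
--         run = j - i
--         if run >= 3:
--             if colors[i] == 'A':
--                 score += run - 2
--             elif colors[i] == 'B':
--                 score -= run - 2
--         i = j
--     return score > 0
-- ===== Notes on version B (the rewrite author's own statement) =====
-- stated objective: simpler
-- what changed: Replaces the per-character stack with incremental move bookkeeping by a two-pointer scan over maximal runs that adds each run's whole contribution (L-2 for runs of length L >= 3) at once.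
import Mathlib
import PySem

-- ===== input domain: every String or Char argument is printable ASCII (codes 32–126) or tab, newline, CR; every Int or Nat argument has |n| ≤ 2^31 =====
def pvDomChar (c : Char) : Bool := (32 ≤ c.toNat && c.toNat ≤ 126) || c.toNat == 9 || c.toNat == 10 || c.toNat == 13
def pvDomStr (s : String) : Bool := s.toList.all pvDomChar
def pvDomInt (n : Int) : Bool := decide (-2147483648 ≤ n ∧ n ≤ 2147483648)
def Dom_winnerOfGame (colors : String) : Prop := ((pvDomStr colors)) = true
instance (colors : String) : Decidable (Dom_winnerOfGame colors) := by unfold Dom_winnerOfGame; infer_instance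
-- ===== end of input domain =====

-- B replaces A's per-character stack with a run-grouping scan that tallies each maximal run's whole contribution at once (simpler decomposition).


-- ===== PORT A =====
-- one iteration of A's for-loop: state = (move, stack); stack.append at the end, stack[-1] = getLast?
def stepA (s : Int × List Char) (c : Char) : Int × List Char :=
  let stack := if s.2 = [] ∨ s.2.getLast? = some c then s.2 ++ [c] else [c]
  let move :=
    if stack.length ≥ 3 ∧ stack.getLast? = some 'A' then s.1 + 1
    else if stack.length ≥ 3 ∧ stack.getLast? = some 'B' then s.1 - 1
    else s.1
  (move, stack)

def winnerOfGame (colors : String) : Bool :=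
  decide ((colors.toList.foldl stepA (0, [])).1 > 0)

-- ===== PORT B =====
-- Source B's inner while loop: length of the leading run of c in c :: rest is 1 + takeWhile
def runScore (c : Char) (run : Nat) : Int :=
  if run ≥ 3 then
    if c = 'A' then (run : Int) - 2
    else if c = 'B' then -((run : Int) - 2)
    else 0
  else 0

-- Source B's outer while loop: jump from run to run accumulating the score
def altGo : List Char → Int
  | [] => 0
  | c :: rest =>
      runScore c (1 + (rest.takeWhile (· == c)).length) + altGo (rest.dropWhile (· == c))
termination_by l => l.length
decreasing_by
  simp only [List.length_cons]
  exact Nat.lt_succ_of_le (List.length_dropWhile_le _ _)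

def winnerOfGame_alt (colors : String) : Bool :=
  decide (altGo colors.toList > 0)

-- ===== PRECONDITION & SPEC =====
def Spec_winnerOfGame (colors : String) (out : Bool) : Prop := out = winnerOfGame_alt colors
instance (colors : String) (out : Bool) : Decidable (Spec_winnerOfGame colors out) := by unfold Spec_winnerOfGame; infer_instance

-- ===== CLAIM (what is proved, stated in full; the proofs are below) =====
def Claim_equal_winnerOfGame : Prop := ∀ (colors : String), Dom_winnerOfGame colors → Spec_winnerOfGame colors (winnerOfGame colors)

-- ===== LEMMAS AND PROOFS =====

-- intermediate tally: processing the rest while the current run is k copies of c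
def T (c : Char) (k : Nat) : List Char → Int
  | [] => runScore c k
  | d :: xs => if d = c then T c (k + 1) xs else runScore c k + T d 1 xs

theorem runScore_one (c : Char) : runScore c 1 = 0 := by
  simp [runScore]

theorem getLast?_replicate_succ (c : Char) (k : Nat) :
    (List.replicate (k + 1) c).getLast? = some c := by
  rw [List.replicate_succ']; exact List.getLast?_concat

theorem stepA_same (m : Int) (k : Nat) (d : Char) :
    stepA (m, List.replicate (k + 1) d) d
      = (m + (runScore d (k + 2) - runScore d (k + 1)), List.replicate (k + 2) d) := by
  have h1 : (List.replicate (k + 1) d).getLast? = some d := getLast?_replicate_succ d k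
  simp only [stepA, h1, or_true, if_true, ← List.replicate_succ', getLast?_replicate_succ,
    List.length_replicate, Option.some.injEq, Prod.mk.injEq, and_true]
  by_cases hA : d = 'A' <;> by_cases hB : d = 'B' <;>
    simp only [runScore, hA, hB, if_true, if_false] <;> split_ifs <;>
    first | (push_cast; omega) | simp_all

theorem stepA_diff (m : Int) (k : Nat) (c d : Char) (hdc : d ≠ c) :
    stepA (m, List.replicate (k + 1) c) d = (m, [d]) := by
  have h1 : (List.replicate (k + 1) c).getLast? = some c := getLast?_replicate_succ c k
  have h2 : ¬(List.replicate (k + 1) c = [] ∨ (List.replicate (k + 1) c).getLast? = some d) := by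
    rintro (hnil | hlast)
    · exact absurd hnil (by simp [List.replicate_succ])
    · rw [h1] at hlast; exact hdc (Option.some.inj hlast).symm
  simp only [stepA]
  rw [if_neg h2]
  simp

-- A's fold, started from a run of k + 1 copies of c with score m
theorem foldA (xs : List Char) : ∀ (m : Int) (c : Char) (k : Nat),
    (xs.foldl stepA (m, List.replicate (k + 1) c)).1
      = m - runScore c (k + 1) + T c (k + 1) xs := by
  induction xs with
  | nil => intro m c k; simp [T]
  | cons d xs ih =>
    intro m c k
    by_cases hdc : d = c
    · subst hdc
      rw [List.foldl_cons, stepA_same, ih]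
      simp only [T, if_true]
      ring_nf
    · rw [List.foldl_cons, stepA_diff m k c d hdc]
      have := ih m d 0
      simp only [zero_add, List.replicate_one] at this
      rw [this]
      simp only [T, if_neg hdc, runScore_one]
      ring

-- T equals B's run-by-run tally
theorem T_eq (xs : List Char) : ∀ (c : Char) (k : Nat),
    T c k xs = runScore c (k + (xs.takeWhile (· == c)).length)
                 + altGo (xs.dropWhile (· == c)) := by
  induction xs with
  | nil => intro c k; simp [T, altGo]
  | cons d xs ih =>
    intro c k
    by_cases hdc : d = c
    · subst hdc
      rw [T, if_pos rfl, ih d (k + 1)]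
      simp only [List.takeWhile_cons, List.dropWhile_cons, beq_self_eq_true, if_true,
        List.length_cons]
      ring_nf
    · rw [T, if_neg hdc]
      have hbeq : (d == c) = false := by simp [hdc]
      simp only [List.takeWhile_cons, List.dropWhile_cons, hbeq, Bool.false_eq_true,
        if_false, List.length_nil, Nat.add_zero]
      rw [altGo, show (1:Nat) + (xs.takeWhile (· == d)).length
            = 1 + (xs.takeWhile (· == d)).length from rfl]
      have := ih d 1
      rw [this]

theorem altGo_eq_T (c : Char) (xs : List Char) : altGo (c :: xs) = T c 1 xs := by
  rw [altGo, T_eq]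

-- ===== VERDICT (by name: the statement is the Claim_ definition above) =====
theorem winnerOfGame_spec : Claim_equal_winnerOfGame := by
  intro colors _
  unfold Spec_winnerOfGame winnerOfGame winnerOfGame_alt
  cases h : colors.toList with
  | nil => simp [altGo]
  | cons c xs =>
    have hstep : stepA ((0 : Int), ([] : List Char)) c = (0, List.replicate 1 c) := by
      simp [stepA, List.replicate]
    rw [List.foldl_cons, hstep]
    have := foldA xs 0 c 0
    simp only [zero_add] at this
    rw [this, runScore_one, altGo_eq_T]
    ring_nf
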